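-- pv_equiv track=rewrite | github.com/mghdev/SD2025_CodingAcademy2 | game_theory/competition.py | scoreRounds
-- ===== SOURCE A (Python) =====
-- POINTS_COOPERATE_SUCCESS = 3
--
-- POINTS_COOPERATE_FAILURE = 0
--
-- POINTS_BETRAY_SUCCESS = 5
--
-- POINTS_BETRAY_FAILURE = 1
--
-- def scoreRounds(history):
--     scores = [0,0]
--     for move_0,move_1 in zip(history[0],history[1]):
--         if move_0 == "C" and move_1 == "C":
--             scores[0] += POINTS_COOPERATE_SUCCESS
--             scores[1] += POINTS_COOPERATE_SUCCESS
--         elif move_0 == "B" and move_1 == "B":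
--             scores[0] += POINTS_BETRAY_FAILURE
--             scores[1] += POINTS_BETRAY_FAILURE
--         elif move_0 == "B":
--             scores[0] += POINTS_BETRAY_SUCCESS
--             scores[1] += POINTS_COOPERATE_FAILURE
--         else:
--             scores[0] += POINTS_COOPERATE_FAILURE
--             scores[1] += POINTS_BETRAY_SUCCESS
--     return scores
-- ===== SOURCE B (Python) =====
-- def scoreRounds(history):
--     rounds = list(zip(history[0], history[1]))
--     cc = sum(1 for a, b in rounds if a == "C" and b == "C")
--     bb = sum(1 for a, b in rounds if a == "B" and b == "B")
--     b_win = sum(1 for a, b in rounds if a == "B" and b != "B")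
--     other = len(rounds) - cc - bb - b_win
--     return [3 * cc + bb + 5 * b_win, 3 * cc + bb + 5 * other]
-- ===== Notes on version B (the rewrite author's own statement) =====
-- stated objective: alternative
-- what changed: Replaces the stateful per-round accumulation loop by four category tallies (CC, BB, B-beats, remainder) over the zipped rounds and a closed arithmetic combination of the counts.
import Mathlib
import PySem

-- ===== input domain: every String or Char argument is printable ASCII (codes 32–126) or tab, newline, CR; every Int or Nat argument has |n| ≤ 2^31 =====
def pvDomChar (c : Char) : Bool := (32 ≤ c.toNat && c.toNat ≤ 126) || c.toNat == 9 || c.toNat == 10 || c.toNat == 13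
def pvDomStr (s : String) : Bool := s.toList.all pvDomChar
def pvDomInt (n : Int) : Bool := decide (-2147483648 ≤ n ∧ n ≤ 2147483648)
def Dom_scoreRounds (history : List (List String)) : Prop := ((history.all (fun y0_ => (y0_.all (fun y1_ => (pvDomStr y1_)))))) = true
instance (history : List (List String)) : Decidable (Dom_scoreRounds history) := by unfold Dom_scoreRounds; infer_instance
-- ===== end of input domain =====

-- B replaces A's stateful per-round accumulation by four category tallies and closed arithmetic (objective: alternative decomposition).

-- ===== PORT A =====
-- A's loop over zip(history[0], history[1]) with the mutable 2-element scores list, kept as a pair; returned as [s0, s1].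
def scoreRounds (history : List (List String)) : List Int :=
  let h0 := (PySem.List.pyGet? history 0).getD []
  let h1 := (PySem.List.pyGet? history 1).getD []
  let scores := (h0.zip h1).foldl (fun (s : Int × Int) p =>
    if p.1 == "C" && p.2 == "C" then (s.1 + 3, s.2 + 3)
    else if p.1 == "B" && p.2 == "B" then (s.1 + 1, s.2 + 1)
    else if p.1 == "B" then (s.1 + 5, s.2 + 0)
    else (s.1 + 0, s.2 + 5)) ((0 : Int), (0 : Int))
  [scores.1, scores.2]

-- ===== PORT B =====
-- Source B: tally the four disjoint round categories (the sum-of-generator counts become countP), then combine arithmetically.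
def scoreRounds_alt (history : List (List String)) : List Int :=
  let rounds := ((PySem.List.pyGet? history 0).getD []).zip ((PySem.List.pyGet? history 1).getD [])
  let cc : Int := rounds.countP (fun p => p.1 == "C" && p.2 == "C")
  let bb : Int := rounds.countP (fun p => p.1 == "B" && p.2 == "B")
  let bwin : Int := rounds.countP (fun p => p.1 == "B" && !(p.2 == "B"))
  let other : Int := (rounds.length : Int) - cc - bb - bwin
  [3 * cc + bb + 5 * bwin, 3 * cc + bb + 5 * other]

-- ===== PRECONDITION & SPEC =====
-- Pre_ excludes history with fewer than two rows, where Python's history[0]/history[1] raises IndexError.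
def Pre_scoreRounds (history : List (List String)) : Prop := 2 ≤ history.length
instance (history : List (List String)) : Decidable (Pre_scoreRounds history) := by unfold Pre_scoreRounds; infer_instance
def pvWitness_scoreRounds : List (List String) := [["C", "B"], ["B", "C"]]
def Spec_scoreRounds (history : List (List String)) (out : List Int) : Prop := out = scoreRounds_alt history
instance (history : List (List String)) (out : List Int) : Decidable (Spec_scoreRounds history out) := by unfold Spec_scoreRounds; infer_instance

-- ===== CLAIM (what is proved, stated in full; the proofs are below) =====
def Claim_equal_scoreRounds : Prop := ∀ (history : List (List String)), Dom_scoreRounds history → Pre_scoreRounds history → Spec_scoreRounds history (scoreRounds history)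

-- ===== LEMMAS AND PROOFS =====

-- A's fold computes, from any start (a, b), exactly the category-count combination B returns.
set_option maxHeartbeats 1000000 in
lemma scoreRounds_fold_eq (l : List (String × String)) : ∀ (a b : Int),
    l.foldl (fun (s : Int × Int) p =>
      if p.1 == "C" && p.2 == "C" then (s.1 + 3, s.2 + 3)
      else if p.1 == "B" && p.2 == "B" then (s.1 + 1, s.2 + 1)
      else if p.1 == "B" then (s.1 + 5, s.2 + 0)
      else (s.1 + 0, s.2 + 5)) (a, b)
    = (a + 3 * (l.countP (fun p => p.1 == "C" && p.2 == "C") : Int)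
         + (l.countP (fun p => p.1 == "B" && p.2 == "B") : Int)
         + 5 * (l.countP (fun p => p.1 == "B" && !(p.2 == "B")) : Int),
       b + 3 * (l.countP (fun p => p.1 == "C" && p.2 == "C") : Int)
         + (l.countP (fun p => p.1 == "B" && p.2 == "B") : Int)
         + 5 * ((l.length : Int)
              - (l.countP (fun p => p.1 == "C" && p.2 == "C") : Int)
              - (l.countP (fun p => p.1 == "B" && p.2 == "B") : Int)
              - (l.countP (fun p => p.1 == "B" && !(p.2 == "B")) : Int))) := by
  induction l with
  | nil => intro a b; simp
  | cons p t ih =>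
    intro a b
    obtain ⟨x, y⟩ := p
    simp only [List.foldl_cons, List.countP_cons, List.length_cons]
    cases hxC : (x == "C") <;> cases hyC : (y == "C") <;> cases hxB : (x == "B") <;> cases hyB : (y == "B") <;>
      [skip; skip; skip; skip; skip; skip; skip; skip; skip; skip; skip; skip; skip; skip; skip; skip] <;>
      first
        | (rw [beq_iff_eq] at hxC hxB; exact absurd (hxC.symm.trans hxB) (by decide))
        | (simp only [hxC, hyC, hxB, hyB, Bool.true_and, Bool.false_and, Bool.and_true, Bool.and_false,
            Bool.not_true, Bool.not_false, if_true, Bool.false_eq_true, if_false, ih]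
           push_cast; ring)

-- ===== VERDICT (by name: the statement is the Claim_ definition above) =====
theorem scoreRounds_spec : Claim_equal_scoreRounds := by
  intro history _ _
  unfold Spec_scoreRounds scoreRounds scoreRounds_alt
  simp only [scoreRounds_fold_eq]
  norm_num
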